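-- pv_equiv track=rewrite | github.com/AnOnYmOus001100/Programming-Data-Structures-and-Algorith | programs/paw2.py | hillvalley
-- ===== SOURCE A (Python) =====
-- def hillvalley(l):
--     if l == []:
--         return False
--     stop = -1
--     i = 1
--     found = 1
--     if l[0] > l[1]:
--         i = 1
--         for i in range(i, len(l)):
--             if l[i - 1] < l[i]:
--                 stop = i
--                 break
--         if stop == -1:
--             return False
--         i = stop
--         for i in range(i, len(l)):
--             if l[i - 1] > l[i]:
--                 found = 0
--                 break
--         return bool(found)
--     elif l[0] < l[1]:
--         for i in range(1, len(l)):
--             if l[i - 1] > l[i]: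
--                 stop = i
--                 break
--         if stop == -1:
--             return False
--         for i in range(i, len(l)):
--             if l[i - 1] < l[i]:
--                 found = 0
--         return bool(found)
--     else:
--         return False
-- ===== SOURCE B (Python) =====
-- def hillvalley(l):
--     signs = [(b > a) - (b < a) for a, b in zip(l, l[1:])]
--     if not signs or signs[0] == 0:
--         return False
--     core = [s for s in signs if s != 0]
--     return sum(1 for x, y in zip(core, core[1:]) if x != y) == 1
-- ===== Notes on version B (the rewrite author's own statement) =====
-- stated objective: simpler
-- what changed: Replaces A's direction branch with two two-phase index scans (find the turning point, then verify the rest) by a single pass: take the signs of consecutive differences, drop plateaus, and accept iff the sign sequence starts nonzero and flips exactly once.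
-- outside the precondition, e.g. on hillvalley([1]): A raises IndexError, B returns False
import Mathlib
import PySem

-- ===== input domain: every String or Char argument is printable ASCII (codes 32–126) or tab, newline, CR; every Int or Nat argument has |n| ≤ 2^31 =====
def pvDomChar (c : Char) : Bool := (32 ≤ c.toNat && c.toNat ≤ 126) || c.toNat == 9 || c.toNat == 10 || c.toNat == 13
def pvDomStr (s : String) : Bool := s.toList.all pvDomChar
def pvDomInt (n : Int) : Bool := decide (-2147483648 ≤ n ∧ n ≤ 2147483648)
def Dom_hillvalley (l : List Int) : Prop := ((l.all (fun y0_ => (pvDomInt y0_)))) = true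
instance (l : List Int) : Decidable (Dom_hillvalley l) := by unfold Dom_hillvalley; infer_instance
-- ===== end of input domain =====

-- B replaces A's two-branch, two-phase index scan by one "signs of differences, count the flips" pass (objective: simpler).

-- ===== PORT A =====
-- first branch, first loop: first i in [i, len) with l[i-1] < l[i], else -1
def pvA_loop1a (l : List Int) (i : Nat) : Int :=
  if _h : i < l.length then
    if l.getD (i-1) 0 < l.getD i 0 then (i : Int)
    else pvA_loop1a l (i+1)
  else -1
termination_by l.length - i

-- first branch, second loop: break with found=0 on l[i-1] > l[i]
def pvA_loop1b (l : List Int) (i : Nat) : Bool :=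
  if _h : i < l.length then
    if l.getD (i-1) 0 > l.getD i 0 then false
    else pvA_loop1b l (i+1)
  else true
termination_by l.length - i

-- second branch, first loop: first i in [1, len) with l[i-1] > l[i], else -1
def pvA_loop2a (l : List Int) (i : Nat) : Int :=
  if _h : i < l.length then
    if l.getD (i-1) 0 > l.getD i 0 then (i : Int)
    else pvA_loop2a l (i+1)
  else -1
termination_by l.length - i

-- second branch, second loop: found cleared (no break) on l[i-1] < l[i]
def pvA_loop2b (l : List Int) (i : Nat) (found : Bool) : Bool :=
  if _h : i < l.length then
    pvA_loop2b l (i+1) (if l.getD (i-1) 0 < l.getD i 0 then false else found)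
  else found
termination_by l.length - i

def hillvalley (l : List Int) : Bool :=
  if l = [] then false
  else
    -- l[0] and l[1]; the IndexError of l[1] on singleton lists is excluded by Pre_, where getD is exact
    let a := l.getD 0 0
    let b := l.getD 1 0
    if a > b then
      let stop := pvA_loop1a l 1
      if stop = -1 then false
      else pvA_loop1b l stop.toNat
    else if a < b then
      let stop := pvA_loop2a l 1
      if stop = -1 then false
      else pvA_loop2b l stop.toNat true
    else false

-- ===== PORT B =====
-- (b > a) - (b < a)
def pvSign (a b : Int) : Int := (if b > a then 1 else 0) - (if b < a then 1 else 0)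

def hillvalley_alt (l : List Int) : Bool :=
  let signs := (l.zip (l.drop 1)).map (fun p => pvSign p.1 p.2)
  -- "if not signs or signs[0] == 0: return False" (short-circuit: signs[0] only read when signs ≠ [])
  if signs = [] then false
  else if signs.headD 0 = 0 then false
  else
    let core := signs.filter (fun s => decide (s ≠ 0))
    decide (((core.zip (core.drop 1)).filter (fun p => decide (p.1 ≠ p.2))).length = 1)

-- ===== PRECONDITION & SPEC =====
-- Pre_ excludes exactly the singleton lists, on which A raises IndexError at l[1].
def Pre_hillvalley (l : List Int) : Prop := l = [] ∨ 2 ≤ l.length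
instance (l : List Int) : Decidable (Pre_hillvalley l) := by unfold Pre_hillvalley; infer_instance
def pvWitness_hillvalley : List Int := [1, 2, 1]

def Spec_hillvalley (l : List Int) (out : Bool) : Prop := out = hillvalley_alt l
instance (l : List Int) (out : Bool) : Decidable (Spec_hillvalley l out) := by unfold Spec_hillvalley; infer_instance

-- ===== CLAIM (what is proved, stated in full; the proofs are below) =====
def Claim_equal_hillvalley : Prop := ∀ (l : List Int), Dom_hillvalley l → Pre_hillvalley l → Spec_hillvalley l (hillvalley l)

-- ===== LEMMAS AND PROOFS =====

-- the difference-sign list both sides are really about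
def pvDs (l : List Int) : List Int := (l.zip (l.drop 1)).map (fun p => pvSign p.1 p.2)

-- shadow of A's first branch on the sign list
def pvFindA1 : List Int → Bool
  | [] => false
  | d :: t => if d = 1 then t.all (fun x => decide (x ≠ -1)) else pvFindA1 t

-- shadow of A's second branch on the sign list
def pvFindA2 : List Int → Bool
  | [] => false
  | d :: t => if d = -1 then t.all (fun x => decide (x ≠ 1)) else pvFindA2 t

-- B's flip count
def pvF (xs : List Int) : Nat := ((xs.zip (xs.drop 1)).filter (fun p => decide (p.1 ≠ p.2))).length

theorem pvDs_length (l : List Int) : (pvDs l).length = l.length - 1 := by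
  simp [pvDs]

theorem pvDs_getElem (l : List Int) (j : Nat) (h : j < (pvDs l).length) :
    (pvDs l)[j] = pvSign (l.getD j 0) (l.getD (j+1) 0) := by
  have hl : j + 1 < l.length := by have := pvDs_length l; omega
  simp only [pvDs, List.getElem_map, List.getElem_zip, List.getElem_drop]
  rw [List.getD_eq_getElem l 0 (by omega : j < l.length), List.getD_eq_getElem l 0 hl]
  simp [Nat.add_comm]

theorem pvDs_mem (l : List Int) (x : Int) (hx : x ∈ pvDs l) : x = -1 ∨ x = 0 ∨ x = 1 := by
  simp only [pvDs, List.mem_map] at hx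
  obtain ⟨p, _, rfl⟩ := hx
  unfold pvSign; split_ifs <;> omega

theorem pvSign_eq_one (a b : Int) : pvSign a b = 1 ↔ a < b := by
  unfold pvSign; split_ifs <;> omega

theorem pvSign_eq_neg_one (a b : Int) : pvSign a b = -1 ↔ b < a := by
  unfold pvSign; split_ifs <;> omega

theorem pvSign_eq_zero (a b : Int) : pvSign a b = 0 ↔ a = b := by
  unfold pvSign; split_ifs <;> omega

theorem pvDs_drop_cons (l : List Int) (j : Nat) (h : j < (pvDs l).length) :
    (pvDs l).drop j = pvSign (l.getD j 0) (l.getD (j+1) 0) :: (pvDs l).drop (j+1) := by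
  rw [List.drop_eq_getElem_cons h, pvDs_getElem l j h]

-- A's loop1b over indices = "no -1 from position i-1 on" over the sign list
theorem pvA_loop1b_eq (l : List Int) (i : Nat) (hi : 1 ≤ i) :
    pvA_loop1b l i = ((pvDs l).drop (i-1)).all (fun x => decide (x ≠ -1)) := by
  by_cases h : i < l.length
  · have hds : i - 1 < (pvDs l).length := by rw [pvDs_length]; omega
    have h1 : i - 1 + 1 = i := by omega
    have ih := pvA_loop1b_eq l (i+1) (by omega)
    have h2 : i + 1 - 1 = i := by omega
    rw [h2] at ih
    rw [pvA_loop1b, dif_pos h, pvDs_drop_cons l (i-1) hds, h1, List.all_cons]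
    by_cases hc : l.getD (i-1) 0 > l.getD i 0
    · have hsig : pvSign (l.getD (i-1) 0) (l.getD i 0) = -1 := (pvSign_eq_neg_one _ _).mpr hc
      rw [if_pos hc, hsig]
      simp
    · have hne1 : pvSign (l.getD (i-1) 0) (l.getD i 0) ≠ -1 := fun hz =>
        hc ((pvSign_eq_neg_one _ _).mp hz)
      rw [if_neg hc, ih, decide_eq_true hne1, Bool.true_and]
  · have hds : (pvDs l).length ≤ i - 1 := by rw [pvDs_length]; omega
    rw [pvA_loop1b, dif_neg h, List.drop_eq_nil_of_le hds]
    simp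
termination_by l.length - i

-- A's loop2b over indices: found && "no 1 from position i-1 on"
theorem pvA_loop2b_eq (l : List Int) (i : Nat) (f : Bool) (hi : 1 ≤ i) :
    pvA_loop2b l i f = (f && ((pvDs l).drop (i-1)).all (fun x => decide (x ≠ 1))) := by
  by_cases h : i < l.length
  · have hds : i - 1 < (pvDs l).length := by rw [pvDs_length]; omega
    have h1 : i - 1 + 1 = i := by omega
    have ih := pvA_loop2b_eq l (i+1) (if l.getD (i-1) 0 < l.getD i 0 then false else f) (by omega)
    have h2 : i + 1 - 1 = i := by omega
    rw [h2] at ih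
    rw [pvA_loop2b, dif_pos h, ih, pvDs_drop_cons l (i-1) hds, h1, List.all_cons]
    by_cases hc : l.getD (i-1) 0 < l.getD i 0
    · have hsig : pvSign (l.getD (i-1) 0) (l.getD i 0) = 1 := (pvSign_eq_one _ _).mpr hc
      rw [if_pos hc, hsig]
      simp
    · have hne1 : pvSign (l.getD (i-1) 0) (l.getD i 0) ≠ 1 := fun hz =>
        hc ((pvSign_eq_one _ _).mp hz)
      rw [if_neg hc, decide_eq_true hne1]
      cases f <;> simp
  · have hds : (pvDs l).length ≤ i - 1 := by rw [pvDs_length]; omega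
    rw [pvA_loop2b, dif_neg h, List.drop_eq_nil_of_le hds]
    simp
termination_by l.length - i

-- A's first branch (find + verify) = shadow on the sign-list suffix
theorem pvBranch1_eq (l : List Int) (i : Nat) (hi : 1 ≤ i) :
    (if pvA_loop1a l i = -1 then false else pvA_loop1b l (pvA_loop1a l i).toNat)
      = pvFindA1 ((pvDs l).drop (i-1)) := by
  by_cases h : i < l.length
  · have hds : i - 1 < (pvDs l).length := by rw [pvDs_length]; omega
    have h1 : i - 1 + 1 = i := by omega
    rw [pvA_loop1a, dif_pos h, pvDs_drop_cons l (i-1) hds, h1, pvFindA1]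
    by_cases hc : l.getD (i-1) 0 < l.getD i 0
    · have hsig : pvSign (l.getD (i-1) 0) (l.getD i 0) = 1 := (pvSign_eq_one _ _).mpr hc
      have hne : (i : Int) ≠ -1 := by omega
      rw [if_pos hc, if_neg hne, if_pos hsig, Int.toNat_natCast,
        pvA_loop1b_eq l i hi, pvDs_drop_cons l (i-1) hds, h1, List.all_cons, hsig]
      simp
    · have hne1 : pvSign (l.getD (i-1) 0) (l.getD i 0) ≠ 1 := fun hz =>
        hc ((pvSign_eq_one _ _).mp hz)
      have ih := pvBranch1_eq l (i+1) (by omega)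
      rw [Nat.add_sub_cancel] at ih
      rw [if_neg hc, ih, if_neg hne1]
  · have hds : (pvDs l).length ≤ i - 1 := by rw [pvDs_length]; omega
    rw [pvA_loop1a, dif_neg h, List.drop_eq_nil_of_le hds]
    simp [pvFindA1]
termination_by l.length - i

theorem pvBranch2_eq (l : List Int) (i : Nat) (hi : 1 ≤ i) :
    (if pvA_loop2a l i = -1 then false else pvA_loop2b l (pvA_loop2a l i).toNat true)
      = pvFindA2 ((pvDs l).drop (i-1)) := by
  by_cases h : i < l.length
  · have hds : i - 1 < (pvDs l).length := by rw [pvDs_length]; omega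
    have h1 : i - 1 + 1 = i := by omega
    rw [pvA_loop2a, dif_pos h, pvDs_drop_cons l (i-1) hds, h1, pvFindA2]
    by_cases hc : l.getD (i-1) 0 > l.getD i 0
    · have hsig : pvSign (l.getD (i-1) 0) (l.getD i 0) = -1 := (pvSign_eq_neg_one _ _).mpr hc
      have hne : (i : Int) ≠ -1 := by omega
      rw [if_pos hc, if_neg hne, if_pos hsig, Int.toNat_natCast,
        pvA_loop2b_eq l i true hi, pvDs_drop_cons l (i-1) hds, h1, List.all_cons, hsig]
      simp
    · have hne1 : pvSign (l.getD (i-1) 0) (l.getD i 0) ≠ -1 := fun hz =>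
        hc ((pvSign_eq_neg_one _ _).mp hz)
      have ih := pvBranch2_eq l (i+1) (by omega)
      rw [Nat.add_sub_cancel] at ih
      rw [if_neg hc, ih, if_neg hne1]
  · have hds : (pvDs l).length ≤ i - 1 := by rw [pvDs_length]; omega
    rw [pvA_loop2a, dif_neg h, List.drop_eq_nil_of_le hds]
    simp [pvFindA2]
termination_by l.length - i

-- flip-count recurrence
theorem pvF_cons2 (a b : Int) (r : List Int) :
    pvF (a :: b :: r) = (if a = b then 0 else 1) + pvF (b :: r) := by
  by_cases h : a = b
  · simp [pvF, h]
  · simp [pvF, h]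
    omega

-- zero flips from a = everything equals a
theorem pvF_eq_zero (a : Int) (r : List Int) :
    decide (pvF (a :: r) = 0) = r.all (fun x => decide (x = a)) := by
  induction r generalizing a with
  | nil => simp [pvF]
  | cons b r' ih =>
    rw [pvF_cons2]
    by_cases h : a = b
    · subst h; simpa using ih a
    · simp [h, Ne.symm h]

-- "no -1" over a sign list = "all 1" over its nonzeros
theorem pvAll_filter (t : List Int) (hr : ∀ x ∈ t, x = -1 ∨ x = 0 ∨ x = 1) :
    t.all (fun x => decide (x ≠ -1)) = (t.filter (fun s => decide (s ≠ 0))).all (fun x => decide (x = 1)) := by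
  induction t with
  | nil => simp
  | cons x t ih =>
    have hx := hr x (by simp)
    have ht : ∀ y ∈ t, y = -1 ∨ y = 0 ∨ y = 1 := fun y hy => hr y (by simp [hy])
    rcases hx with rfl | rfl | rfl
    · simp
    · rw [List.all_cons, List.filter_cons_of_neg (by decide),
        show (decide ((0:ℤ) ≠ -1)) = true from by decide, Bool.true_and]
      exact ih ht
    · rw [List.all_cons, List.filter_cons_of_pos (by decide), List.all_cons,
        show (decide ((1:ℤ) ≠ -1)) = true from by decide,
        show (decide ((1:ℤ) = 1)) = true from by decide, Bool.true_and, Bool.true_and]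
      exact ih ht

theorem pvAll_filter' (t : List Int) (hr : ∀ x ∈ t, x = -1 ∨ x = 0 ∨ x = 1) :
    t.all (fun x => decide (x ≠ 1)) = (t.filter (fun s => decide (s ≠ 0))).all (fun x => decide (x = -1)) := by
  induction t with
  | nil => simp
  | cons x t ih =>
    have hx := hr x (by simp)
    have ht : ∀ y ∈ t, y = -1 ∨ y = 0 ∨ y = 1 := fun y hy => hr y (by simp [hy])
    rcases hx with rfl | rfl | rfl
    · rw [List.all_cons, List.filter_cons_of_pos (by decide), List.all_cons,
        show (decide ((-1:ℤ) ≠ 1)) = true from by decide,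
        show (decide ((-1:ℤ) = -1)) = true from by decide, Bool.true_and, Bool.true_and]
      exact ih ht
    · rw [List.all_cons, List.filter_cons_of_neg (by decide),
        show (decide ((0:ℤ) ≠ 1)) = true from by decide, Bool.true_and]
      exact ih ht
    · simp

-- key: A's first-branch shadow = "exactly one flip" after prepending the leading -1
theorem pvFindA1_eq_flips (t : List Int) (hr : ∀ x ∈ t, x = -1 ∨ x = 0 ∨ x = 1) :
    pvFindA1 t = decide (pvF (-1 :: t.filter (fun s => decide (s ≠ 0))) = 1) := by
  induction t with
  | nil => simp [pvFindA1, pvF]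
  | cons x t ih =>
    have hx := hr x (by simp)
    have ht : ∀ y ∈ t, y = -1 ∨ y = 0 ∨ y = 1 := fun y hy => hr y (by simp [hy])
    rcases hx with rfl | rfl | rfl
    · -- x = -1 : skipped by the search, merges into the leading run of -1s
      rw [pvFindA1, if_neg (by omega : ¬ (-1 : Int) = 1), ih ht]
      have hfil : ((-1 : Int) :: t).filter (fun s => decide (s ≠ 0)) = -1 :: t.filter (fun s => decide (s ≠ 0)) := by simp
      rw [hfil, pvF_cons2]
      simp
    · -- x = 0 : dropped on both sides
      rw [pvFindA1, if_neg (by omega : ¬ (0 : Int) = 1), ih ht]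
      simp
    · -- x = 1 : the flip happens here; afterwards no descent is allowed
      rw [pvFindA1, if_pos rfl]
      have hfil : ((1 : Int) :: t).filter (fun s => decide (s ≠ 0)) = 1 :: t.filter (fun s => decide (s ≠ 0)) := by simp
      rw [hfil, pvF_cons2, if_neg (by omega : ¬ (-1 : Int) = 1)]
      have hd : decide (1 + pvF (1 :: t.filter (fun s => decide (s ≠ 0))) = 1)
          = decide (pvF (1 :: t.filter (fun s => decide (s ≠ 0))) = 0) :=
        decide_eq_decide.mpr (by omega)
      rw [hd, pvF_eq_zero, ← pvAll_filter t ht]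

theorem pvFindA2_eq_flips (t : List Int) (hr : ∀ x ∈ t, x = -1 ∨ x = 0 ∨ x = 1) :
    pvFindA2 t = decide (pvF (1 :: t.filter (fun s => decide (s ≠ 0))) = 1) := by
  induction t with
  | nil => simp [pvFindA2, pvF]
  | cons x t ih =>
    have hx := hr x (by simp)
    have ht : ∀ y ∈ t, y = -1 ∨ y = 0 ∨ y = 1 := fun y hy => hr y (by simp [hy])
    rcases hx with rfl | rfl | rfl
    · -- x = -1 : the flip happens here; afterwards no ascent is allowed
      rw [pvFindA2, if_pos rfl]
      have hfil : ((-1 : Int) :: t).filter (fun s => decide (s ≠ 0)) = -1 :: t.filter (fun s => decide (s ≠ 0)) := by simp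
      rw [hfil, pvF_cons2, if_neg (by omega : ¬ (1 : Int) = -1)]
      have hd : decide (1 + pvF (-1 :: t.filter (fun s => decide (s ≠ 0))) = 1)
          = decide (pvF (-1 :: t.filter (fun s => decide (s ≠ 0))) = 0) :=
        decide_eq_decide.mpr (by omega)
      rw [hd, pvF_eq_zero, ← pvAll_filter' t ht]
    · rw [pvFindA2, if_neg (by omega : ¬ (0 : Int) = -1), ih ht]
      simp
    · rw [pvFindA2, if_neg (by omega : ¬ (1 : Int) = -1), ih ht]
      have hfil : ((1 : Int) :: t).filter (fun s => decide (s ≠ 0)) = 1 :: t.filter (fun s => decide (s ≠ 0)) := by simp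
      rw [hfil, pvF_cons2]
      simp

-- ===== VERDICT (by name: the statement is the Claim_ definition above) =====
theorem hillvalley_spec : Claim_equal_hillvalley := by
  unfold Claim_equal_hillvalley
  intro l _ hpre
  unfold Spec_hillvalley
  rcases hpre with rfl | hlen
  · decide
  · have hnil : l ≠ [] := by intro h; subst h; exact absurd hlen (by decide)
    have hds : 0 < (pvDs l).length := by rw [pvDs_length]; omega
    obtain ⟨s0, t, hdst⟩ : ∃ s0 t, pvDs l = s0 :: t := by
      rcases hmatch : pvDs l with _ | ⟨s0, t⟩
      · rw [hmatch] at hds; simp at hds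
      · exact ⟨s0, t, rfl⟩
    have hs0 : s0 = pvSign (l.getD 0 0) (l.getD 1 0) := by
      have h0 := pvDs_getElem l 0 hds
      simp only [hdst, List.getElem_cons_zero, Nat.zero_add] at h0
      exact h0
    have hdst' : (l.zip (l.drop 1)).map (fun p => pvSign p.1 p.2) = s0 :: t := hdst
    have hrange : ∀ x ∈ t, x = -1 ∨ x = 0 ∨ x = 1 := by
      intro x hx
      exact pvDs_mem l x (by rw [hdst]; simp [hx])
    rw [hillvalley, if_neg hnil]
    simp only [hillvalley_alt, hdst']
    rw [if_neg (List.cons_ne_nil s0 t)]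
    simp only [List.headD_cons]
    by_cases hab : l.getD 0 0 > l.getD 1 0
    · rw [if_pos hab]
      have hsig : s0 = -1 := by rw [hs0, pvSign_eq_neg_one]; exact hab
      have h1 := pvBranch1_eq l 1 (by omega)
      simp only [Nat.sub_self, List.drop_zero] at h1
      rw [h1, hdst, pvFindA1, if_neg (by rw [hsig]; omega), if_neg (by rw [hsig]; omega : ¬ s0 = 0)]
      have hfil : (s0 :: t).filter (fun s => decide (s ≠ 0)) = -1 :: t.filter (fun s => decide (s ≠ 0)) := by
        rw [hsig]; simp
      rw [hfil, pvFindA1_eq_flips t hrange, pvF]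
    · rw [if_neg hab]
      by_cases hab2 : l.getD 0 0 < l.getD 1 0
      · rw [if_pos hab2]
        have hsig : s0 = 1 := by rw [hs0, pvSign_eq_one]; exact hab2
        have h2 := pvBranch2_eq l 1 (by omega)
        simp only [Nat.sub_self, List.drop_zero] at h2
        rw [h2, hdst, pvFindA2, if_neg (by rw [hsig]; omega), if_neg (by rw [hsig]; omega : ¬ s0 = 0)]
        have hfil : (s0 :: t).filter (fun s => decide (s ≠ 0)) = 1 :: t.filter (fun s => decide (s ≠ 0)) := by
          rw [hsig]; simp
        rw [hfil, pvFindA2_eq_flips t hrange, pvF]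
      · have hsig : s0 = 0 := by rw [hs0, pvSign_eq_zero]; omega
        rw [if_neg hab2, if_pos hsig]
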